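-- pv_equiv track=rewrite | github.com/bsu-jacksonmorton/leetcode-challenge-solutions | 1805/solution.py | numDifferentIntegers
-- ===== SOURCE A (Python) =====
-- def numDifferentIntegers(word: str) -> int:
--     ans = 0
--     s = []
--     seen = set()
--     for c in word:
--       if c.isalpha():
--         if s:
--           seen.add("".join(s))
--           s = []
--       elif c == "0":
--         if s and s[0] != "0" or not s:
--           s.append("0")
--       else:
--         if len(s) == 1 and s[0] == "0":
--           s.pop()
--         s.append(c)
--     if s:
--       seen.add("".join(s))
--     return len(seen)
-- ===== SOURCE B (Python) =====
-- def numDifferentIntegers(word: str) -> int: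
--     # Mask letters with a sentinel ('\0' cannot occur in the printable-ASCII input),
--     # split into non-letter tokens, normalize leading zeros, count distinct.
--     tokens = ''.join('\0' if c.isalpha() else c for c in word).split('\0')
--     return len({t.lstrip('0') or '0' for t in tokens if t})
-- ===== Notes on version B (the rewrite author's own statement) =====
-- stated objective: idiomatic
-- what changed: Replaces A's inline character-state machine (mutable pending-token buffer with pop/append leading-zero handling) by a split-then-normalize pipeline: mask letters with a sentinel, split the whole string into non-letter tokens at once, strip each token's leading zeros (an all-zero token keeps a single zero digit), and count the distinct normalized tokens as a set.
import Mathlib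
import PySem

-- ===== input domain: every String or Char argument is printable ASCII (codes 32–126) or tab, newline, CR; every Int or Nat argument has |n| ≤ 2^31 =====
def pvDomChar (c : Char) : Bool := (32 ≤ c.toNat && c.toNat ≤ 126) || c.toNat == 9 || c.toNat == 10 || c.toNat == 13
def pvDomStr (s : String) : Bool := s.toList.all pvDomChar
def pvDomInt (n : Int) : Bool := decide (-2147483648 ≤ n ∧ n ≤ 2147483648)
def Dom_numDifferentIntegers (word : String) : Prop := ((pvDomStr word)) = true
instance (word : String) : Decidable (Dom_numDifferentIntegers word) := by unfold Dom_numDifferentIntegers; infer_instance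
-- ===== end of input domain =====

-- B replaces A's inline character-state machine by a mask/split/normalize pipeline (idiomatic, same cost).


-- ===== PORT A =====
-- loop body of A: state = (seen, s); A's variable `ans` is dead (never incremented, never returned)
def stepA (acc : PySem.Set String × List Char) (c : Char) : PySem.Set String × List Char :=
  let seen := acc.1
  let s := acc.2
  if PySem.Chars.isalpha c then
    if s ≠ [] then (PySem.Set.add seen (String.ofList s), []) else (seen, s)
  else if c = '0' then
    if (s ≠ [] ∧ s.head? ≠ some '0') ∨ s = [] then (seen, s ++ ['0']) else (seen, s)
  else
    let s1 := if s.length = 1 ∧ s.head? = some '0' then [] else s  -- s.pop() on the singleton ["0"]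
    (seen, s1 ++ [c])

-- the trailing `if s: seen.add("".join(s))`
def finalizeA (p : PySem.Set String × List Char) : PySem.Set String :=
  if p.2 ≠ [] then PySem.Set.add p.1 (String.ofList p.2) else p.1

def numDifferentIntegers (word : String) : Int :=
  (PySem.Set.len (finalizeA (word.toList.foldl stepA (PySem.Set.empty, []))) : Int)

-- ===== PORT B =====
-- one token of the set comprehension: `t.lstrip('0') or '0'` if t, skipped if empty;
-- t.lstrip('0') drops the leading '0' characters = dropWhile (exact)
def stepB (st : PySem.Set String) (t : List Char) : PySem.Set String :=
  if t = [] then st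
  else PySem.Set.add st
    (if t.dropWhile (· == '0') = [] then "0" else String.ofList (t.dropWhile (· == '0')))

def numDifferentIntegers_alt (word : String) : Int :=
  -- tokens = ''.join('\0' if c.isalpha() else c for c in word).split('\0');
  -- len({t.lstrip('0') or '0' for t in tokens if t})
  (PySem.Set.len
    ((PySem.Chars.splitOn
        (word.toList.map (fun c => if PySem.Chars.isalpha c then '\x00' else c)) ['\x00']).foldl
      stepB PySem.Set.empty) : Int)

-- ===== PRECONDITION & SPEC =====
def Spec_numDifferentIntegers (word : String) (out : Int) : Prop := out = numDifferentIntegers_alt word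
instance (word : String) (out : Int) : Decidable (Spec_numDifferentIntegers word out) := by unfold Spec_numDifferentIntegers; infer_instance

-- ===== CLAIM (what is proved, stated in full; the proofs are below) =====
def Claim_equal_numDifferentIntegers : Prop := ∀ (word : String), Dom_numDifferentIntegers word → Spec_numDifferentIntegers word (numDifferentIntegers word)

-- ===== LEMMAS AND PROOFS =====

-- normalized form of a completed raw token (leading zeros stripped, all-zero token becomes "0")
def tokA (t : List Char) : List Char :=
  if t.dropWhile (· == '0') = [] then ['0'] else t.dropWhile (· == '0')

-- A's pending buffer as a function of the raw pending token
def pend (r : List Char) : List Char := if r = [] then [] else tokA r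

lemma tokA_ne_nil (r : List Char) : tokA r ≠ [] := by
  unfold tokA; split
  · simp
  · next h => exact h

lemma stepB_eq (st : PySem.Set String) (t : List Char) :
    stepB st t = if t = [] then st else PySem.Set.add st (String.ofList (tokA t)) := by
  unfold stepB tokA
  split
  · rfl
  · split <;> rfl

-- head of a nonempty dropWhile result does not satisfy the predicate
lemma head_dropWhile_ne (r : List Char) (h : r.dropWhile (· == '0') ≠ []) :
    (r.dropWhile (· == '0')).head? ≠ some '0' := by
  obtain ⟨c, t, hct⟩ := List.exists_cons_of_ne_nil h
  have := List.head?_dropWhile_not (p := (· == '0')) (l := r)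
  rw [hct] at this ⊢
  simp only [List.head?_cons] at this ⊢
  intro hc
  rw [← Option.some_inj.mp hc] at this
  simp at this

-- the state transition: on a non-letter c, A's buffer tracks pend of the raw token
lemma stepA_pend (seen : PySem.Set String) (r : List Char) (c : Char)
    (hc : PySem.Chars.isalpha c = false) :
    stepA (seen, pend r) c = (seen, pend (r ++ [c])) := by
  by_cases hr : r = []
  · subst hr
    by_cases h0 : c = '0'
    · subst h0; simp [stepA, pend, tokA, hc, List.dropWhile]
    · have h0b : (c == '0') = false := by simp [h0]
      simp [stepA, pend, tokA, hc, h0, h0b]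
  · by_cases hz : r.dropWhile (· == '0') = []
    · -- r is all zeros (nonempty): A's buffer is ['0']
      have h1 : pend r = ['0'] := by simp [pend, hr, tokA, hz]
      by_cases h0 : c = '0'
      · subst h0
        have h2 : pend (r ++ ['0']) = ['0'] := by
          simp [pend, tokA, List.dropWhile_append, hz, List.dropWhile]
        rw [h1, h2]; simp [stepA, hc]
      · have h0b : (c == '0') = false := by simp [h0]
        have h2 : pend (r ++ [c]) = [c] := by
          simp [pend, tokA, List.dropWhile_append, hz, List.dropWhile, h0b]
        rw [h1, h2]; simp [stepA, hc, h0]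
    · -- A's buffer is the stripped nonempty token, its head ≠ '0'
      have hh := head_dropWhile_ne r hz
      have h1 : pend r = r.dropWhile (· == '0') := by simp [pend, hr, tokA, hz]
      have h2 : pend (r ++ [c]) = r.dropWhile (· == '0') ++ [c] := by
        simp [pend, tokA, List.dropWhile_append, hz]
      rw [h1, h2]
      by_cases h0 : c = '0'
      · subst h0
        simp only [stepA, hc, Bool.false_eq_true, if_false]
        rw [if_pos trivial, if_pos (Or.inl ⟨hz, hh⟩)]
      · have hlen : ¬ ((r.dropWhile (· == '0')).length = 1 ∧ (r.dropWhile (· == '0')).head? = some '0') := by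
          rintro ⟨-, h⟩; exact hh h
        simp only [stepA, hc, Bool.false_eq_true, if_false]
        rw [if_neg h0, if_neg hlen]

lemma stepA_alpha (seen : PySem.Set String) (r : List Char) (c : Char)
    (hc : PySem.Chars.isalpha c = true) :
    stepA (seen, pend r) c = ((if r = [] then seen else PySem.Set.add seen (String.ofList (tokA r))), []) := by
  unfold stepA
  by_cases hr : r = []
  · subst hr; simp [pend, hc]
  · simp [hc, pend, hr]
    exact fun h => absurd h (tokA_ne_nil r)

lemma modifyHead_nil_append (xs : List (List Char)) :
    xs.modifyHead (([] : List Char) ++ ·) = xs := by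
  cases xs <;> simp

lemma modifyHead_id (xs : List (List Char)) :
    xs.modifyHead (fun x => x) = xs := by
  cases xs <;> simp

-- main invariant: A's fold, finalized, equals B's fold over the raw tokens of r ++ l
lemma main_inv (l : List Char) : ∀ (seen : PySem.Set String) (r : List Char),
    finalizeA (l.foldl stepA (seen, pend r)) =
      ((l.splitOnP (fun c => PySem.Chars.isalpha c)).modifyHead (r ++ ·)).foldl stepB seen := by
  induction l with
  | nil =>
    intro seen r
    simp only [List.foldl_nil, List.splitOnP_nil, List.modifyHead_cons, List.foldl_cons,
      List.foldl_nil, List.append_nil]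
    unfold finalizeA
    rw [stepB_eq]
    by_cases hr : r = []
    · simp [hr, pend]
    · simp [hr, pend]
      exact fun h => absurd h (tokA_ne_nil r)
  | cons c l ih =>
    intro seen r
    rw [List.foldl_cons, List.splitOnP_cons]
    by_cases hc : PySem.Chars.isalpha c
    · rw [stepA_alpha seen r c hc, if_pos hc]
      have hih := ih (if r = [] then seen else PySem.Set.add seen (String.ofList (tokA r))) []
      rw [show pend ([] : List Char) = [] from rfl, modifyHead_nil_append] at hih
      rw [hih, List.modifyHead_cons, List.foldl_cons, stepB_eq, List.append_nil]
    · have hc' : PySem.Chars.isalpha c = false := by simpa using hc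
      rw [stepA_pend seen r c hc', ih, if_neg (by simp [hc']), List.modifyHead_modifyHead]
      have hfun : (fun x => r ++ [c] ++ x) = ((fun x => r ++ x) ∘ List.cons c) := by
        funext t; simp
      rw [hfun]

-- splitting on a single-character separator is List.splitOnP
lemma splitOn_go_single (z : Char) : ∀ (fuel : Nat) (l cur : List Char) (acc : List (List Char)),
    l.length < fuel →
    PySem.Chars.splitOn.go [z] fuel l cur acc =
      acc.reverse ++ (l.splitOnP (· == z)).modifyHead (cur.reverse ++ ·) := by
  intro fuel
  induction fuel with
  | zero => intro l cur acc h; omega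
  | succ n ih =>
    intro l cur acc h
    cases l with
    | nil => simp [PySem.Chars.splitOn.go]
    | cons c rest =>
      by_cases hcz : c = z
      · rw [show PySem.Chars.splitOn.go [z] (n+1) (c::rest) cur acc
              = PySem.Chars.splitOn.go [z] n rest [] (cur.reverse :: acc) by
            simp [PySem.Chars.splitOn.go, List.isPrefixOf, hcz]]
        rw [ih rest [] _ (by simpa using Nat.lt_of_succ_lt_succ h)]
        rw [List.splitOnP_cons]
        have hb : (c == z) = true := by simp [hcz]
        rw [hb]
        simp [modifyHead_id]
      · rw [show PySem.Chars.splitOn.go [z] (n+1) (c::rest) cur acc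
              = PySem.Chars.splitOn.go [z] n rest (c::cur) acc by
            have hzc : (z == c) = false := beq_eq_false_iff_ne.mpr (Ne.symm hcz)
            simp [PySem.Chars.splitOn.go, List.isPrefixOf, hzc]]
        rw [ih rest _ _ (by simpa using Nat.lt_of_succ_lt_succ h)]
        rw [List.splitOnP_cons]
        have hczb : (c == z) = false := by simp [hcz]
        rw [hczb]
        simp only [Bool.false_eq_true, if_false, List.modifyHead_modifyHead]
        have hfun2 : (fun x => (c :: cur).reverse ++ x) = ((fun x => cur.reverse ++ x) ∘ List.cons c) := by
          funext t; simp
        rw [hfun2]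

lemma splitOn_single (z : Char) (l : List Char) :
    PySem.Chars.splitOn l [z] = l.splitOnP (· == z) := by
  unfold PySem.Chars.splitOn
  rw [splitOn_go_single z (l.length + 1) l [] [] (by omega)]
  simp [modifyHead_id]

-- B's masked split equals splitting the original at letters, when '\x00' never occurs
lemma splitOn_mask (l : List Char) (h : ∀ c ∈ l, c ≠ '\x00') :
    PySem.Chars.splitOn (l.map (fun c => if PySem.Chars.isalpha c then '\x00' else c)) ['\x00'] =
      l.splitOnP (fun c => PySem.Chars.isalpha c) := by
  rw [splitOn_single]
  induction l with
  | nil => rfl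
  | cons c rest ih =>
    have hc0 : c ≠ '\x00' := h c (by simp)
    rw [List.map_cons, List.splitOnP_cons, List.splitOnP_cons,
        ih (fun d hd => h d (by simp [hd]))]
    by_cases hc : PySem.Chars.isalpha c
    · simp [hc]
    · have h1 : ((if PySem.Chars.isalpha c then '\x00' else c) == '\x00') = false := by
        simp [hc, hc0]
      simp only [h1, Bool.false_eq_true, if_false]
      simp [hc]

-- Dom chars are never the sentinel '\x00'
lemma dom_no_nul (word : String) (h : Dom_numDifferentIntegers word) :
    ∀ c ∈ word.toList, c ≠ '\x00' := by
  intro c hc h0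
  have := List.all_eq_true.mp h c hc
  subst h0
  simp [pvDomChar] at this

-- ===== VERDICT (by name: the statement is the Claim_ definition above) =====
theorem numDifferentIntegers_spec : Claim_equal_numDifferentIntegers := by
  intro word hdom
  unfold Spec_numDifferentIntegers numDifferentIntegers numDifferentIntegers_alt
  rw [splitOn_mask word.toList (dom_no_nul word hdom)]
  have := main_inv word.toList PySem.Set.empty []
  rw [modifyHead_nil_append] at this
  rw [show ([] : List Char) = pend [] from rfl, this]
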